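-- pv_equiv track=rewrite | github.com/jlga94/tesis | Industrial/preprocesamiento.py | _separateFirstLetterFromPunctuation
-- ===== SOURCE A (Python) =====
-- import string
--
-- def _separateFirstLetterFromPunctuation(text):
-- 	newText=''
-- 	previousLetter='1'
-- 	for letter in text:
-- 		if(previousLetter in string.punctuation and letter.isalpha()):
-- 			newText+=' '
-- 		newText+=letter
-- 		previousLetter=letter
-- 	return newText
-- ===== SOURCE B (Python) =====
-- import string
--
-- def _separateFirstLetterFromPunctuation(text):
--     # Cascade of global replacements: for each punctuation/letter pair, replace
--     # the adjacent two-char sequence by the spaced three-char sequence.  Letters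
--     # are never punctuation, so matches of different pairs cannot overlap and an
--     # inserted space never creates or destroys another pair's occurrence.
--     for p in string.punctuation:
--         for l in string.ascii_letters:
--             text = text.replace(p + l, p + ' ' + l)
--     return text
-- ===== Notes on version B (the rewrite author's own statement) =====
-- stated objective: alternative
-- what changed: Replaced A's single stateful character scan (accumulator + previous-letter variable) with a cascade of global str.replace passes: for each (punctuation, ASCII letter) pair the two-char adjacency is rewritten to the spaced form; pairs cannot overlap since letters are never punctuation, so the cascade equals the scan.
import Mathlib
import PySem

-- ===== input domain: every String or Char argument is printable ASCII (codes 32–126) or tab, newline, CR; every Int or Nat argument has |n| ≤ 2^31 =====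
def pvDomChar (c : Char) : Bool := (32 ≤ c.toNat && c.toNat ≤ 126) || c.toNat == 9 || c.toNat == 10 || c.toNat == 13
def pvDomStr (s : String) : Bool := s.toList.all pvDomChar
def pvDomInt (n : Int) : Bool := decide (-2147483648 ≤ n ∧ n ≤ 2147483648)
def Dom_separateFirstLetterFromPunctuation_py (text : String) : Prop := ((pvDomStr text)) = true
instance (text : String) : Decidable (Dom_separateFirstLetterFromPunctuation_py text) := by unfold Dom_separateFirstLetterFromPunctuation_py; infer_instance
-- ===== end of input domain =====

-- B replaces A's single stateful character scan with a cascade of global replace passes,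
-- one per (punctuation, ASCII letter) pair (alternative decomposition, same return value).

-- string.punctuation (exact ASCII constant)
def pvPunctuation : List Char := ['!', '"', '#', '$', '%', '&', '\'', '(', ')', '*', '+', ',', '-', '.', '/', ':', ';', '<', '=', '>', '?', '@', '[', '\\', ']', '^', '_', '`', '{', '|', '}', '~']
-- string.ascii_letters (exact ASCII constant)
def pvLetters : List Char := ['a', 'b', 'c', 'd', 'e', 'f', 'g', 'h', 'i', 'j', 'k', 'l', 'm', 'n', 'o', 'p', 'q', 'r', 's', 't', 'u', 'v', 'w', 'x', 'y', 'z', 'A', 'B', 'C', 'D', 'E', 'F', 'G', 'H', 'I', 'J', 'K', 'L', 'M', 'N', 'O', 'P', 'Q', 'R', 'S', 'T', 'U', 'V', 'W', 'X', 'Y', 'Z']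

-- ===== PORT A =====
-- loop state is (newText, previousLetter), exactly as in the Python
def separateFirstLetterFromPunctuation_py (text : String) : String :=
  let r := text.toList.foldl
    (fun (st : List Char × Char) letter =>
      let newText :=
        (if pvPunctuation.contains st.2 && PySem.Chars.isalpha letter then st.1 ++ [' '] else st.1)
        ++ [letter]
      (newText, letter))
    ([], '1')
  String.mk r.1

-- ===== PORT B =====
-- for p in string.punctuation: for l in string.ascii_letters: text = text.replace(p+l, p+' '+l)
def separateFirstLetterFromPunctuation_py_alt (text : String) : String :=
  String.mk (pvPunctuation.foldl
    (fun s p => pvLetters.foldl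
      (fun s l => PySem.Chars.replace s [p, l] [p, ' ', l]) s)
    text.toList)

-- ===== PRECONDITION & SPEC =====
def Spec_separateFirstLetterFromPunctuation_py (text : String) (out : String) : Prop := out = separateFirstLetterFromPunctuation_py_alt text
instance (text : String) (out : String) : Decidable (Spec_separateFirstLetterFromPunctuation_py text out) := by unfold Spec_separateFirstLetterFromPunctuation_py; infer_instance

-- ===== CLAIM (what is proved, stated in full; the proofs are below) =====
def Claim_equal_separateFirstLetterFromPunctuation_py : Prop := ∀ (text : String), Dom_separateFirstLetterFromPunctuation_py text → Spec_separateFirstLetterFromPunctuation_py text (separateFirstLetterFromPunctuation_py text)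

-- ===== LEMMAS AND PROOFS =====

-- the pair predicate A's scan separates on
def pvQA (a b : Char) : Bool := pvPunctuation.contains a && PySem.Chars.isalpha b

-- characters emitted after a prefix ending in `prev`, separating on pair predicate Q
def pvSpreadQ (Q : Char → Char → Bool) : Char → List Char → List Char
  | _, [] => []
  | prev, c :: t => (if Q prev c then [' ', c] else [c]) ++ pvSpreadQ Q c t

-- insert a space inside every adjacent pair satisfying Q
def pvIns (Q : Char → Char → Bool) : List Char → List Char
  | [] => []
  | c :: t => c :: pvSpreadQ Q c t

-- greedy left-to-right replacement of [p, l] by [p, ' ', l]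
def pvRep2 (p l : Char) : List Char → List Char
  | [] => []
  | [c] => [c]
  | a :: b :: t => if a = p ∧ b = l then p :: ' ' :: l :: pvRep2 p l t else a :: pvRep2 p l (b :: t)

-- character-class facts
lemma isalpha_eq_contains (c : Char) : PySem.Chars.isalpha c = pvLetters.contains c := by
  simp only [PySem.Chars.isalpha, PySem.Chars.isupper, PySem.Chars.islower, pvLetters,
    List.contains_cons, List.contains_nil, Char.le_def]
  rw [Bool.eq_iff_iff]
  simp [Char.ext_iff, UInt32.le_iff_toNat_le, UInt32.ext_iff]
  omega

lemma punct_not_alpha (c : Char) (h : pvPunctuation.contains c = true) :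
    PySem.Chars.isalpha c = false := by
  simp only [pvPunctuation, List.contains_cons, List.contains_nil] at h
  simp only [PySem.Chars.isalpha, PySem.Chars.isupper, PySem.Chars.islower, Char.le_def]
  rw [Bool.eq_false_iff, Ne, Bool.eq_iff_iff]
  simp only [Bool.or_eq_true, Bool.and_eq_true, decide_eq_true_eq, iff_true] at h ⊢
  simp [Char.ext_iff, UInt32.le_iff_toNat_le, UInt32.ext_iff] at h ⊢
  omega

-- A's loop computes pvSpreadQ pvQA
lemma foldA_spec (cs : List Char) (acc : List Char) (prev : Char) :
    (cs.foldl
      (fun (st : List Char × Char) letter =>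
        let newText :=
          (if pvPunctuation.contains st.2 && PySem.Chars.isalpha letter then st.1 ++ [' '] else st.1)
          ++ [letter]
        (newText, letter)) (acc, prev)).1 = acc ++ pvSpreadQ pvQA prev cs := by
  induction cs generalizing acc prev with
  | nil => simp [pvSpreadQ]
  | cons c rest ih =>
    simp only [List.foldl_cons, pvSpreadQ, pvQA]
    rw [ih]
    split_ifs <;> simp

-- PySem replace with a two-char pattern is pvRep2
lemma go_rep2 (p l : Char) : ∀ (fuel : Nat) (s acc : List Char), s.length ≤ fuel →
    PySem.Chars.replace.go [p, l] [p, ' ', l] fuel s acc = acc.reverse ++ pvRep2 p l s := by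
  intro fuel
  induction fuel with
  | zero =>
    intro s acc h
    have : s = [] := List.eq_nil_of_length_eq_zero (Nat.le_zero.mp h)
    subst this
    rw [PySem.Chars.replace.go.eq_def]
    simp [pvRep2]
  | succ fuel ih =>
    intro s acc h
    match s with
    | [] => rw [PySem.Chars.replace.go.eq_def]; simp [pvRep2]
    | [c] =>
      rw [PySem.Chars.replace.go.eq_def]
      have hpre : [p, l].isPrefixOf [c] = false := by
        simp [List.isPrefixOf]
      simp only [hpre, Bool.false_eq_true, if_false]
      rw [ih [] (c :: acc) (by simp)]
      simp [pvRep2]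
    | a :: b :: t =>
      rw [PySem.Chars.replace.go.eq_def]
      simp only [List.length_cons] at h
      by_cases hab : a = p ∧ b = l
      · obtain ⟨rfl, rfl⟩ := hab
        have hpre : [a, b].isPrefixOf (a :: b :: t) = true := by
          simp [List.isPrefixOf]
        simp only [hpre, if_true]
        have hdrop : List.drop [a, b].length (a :: b :: t) = t := rfl
        rw [hdrop, ih t _ (by omega)]
        simp [pvRep2]
      · have hpre : [p, l].isPrefixOf (a :: b :: t) = false := by
          simp only [List.isPrefixOf, Bool.and_true, Bool.and_eq_false_iff,
            beq_eq_false_iff_ne, ne_eq]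
          rcases not_and_or.mp hab with h1 | h1
          · exact Or.inl (fun e => h1 e.symm)
          · exact Or.inr (fun e => h1 e.symm)
        simp only [hpre, Bool.false_eq_true, if_false]
        rw [ih (b :: t) (a :: acc) (by simp; omega)]
        simp only [pvRep2, hab, if_false, List.reverse_cons, List.append_assoc,
          List.cons_append, List.nil_append]

lemma replace_rep2 (p l : Char) (s : List Char) :
    PySem.Chars.replace s [p, l] [p, ' ', l] = pvRep2 p l s := by
  rw [PySem.Chars.replace]
  simp only [List.isEmpty_cons, Bool.false_eq_true, if_false]
  rw [go_rep2 p l s.length s [] le_rfl]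
  simp

-- one replace pass on an already-partially-separated string adds exactly its own pair
lemma rep2_ins (p l : Char) (hp : pvPunctuation.contains p = true) (hl : PySem.Chars.isalpha l = true)
    (Q : Char → Char → Bool)
    (hQ : ∀ a b, Q a b = true → pvPunctuation.contains a = true ∧ PySem.Chars.isalpha b = true)
    (cs : List Char) :
    pvRep2 p l (pvIns Q cs) = pvIns (fun a b => Q a b || (a == p && b == l)) cs := by
  have hlsp : l ≠ ' ' := by
    intro hle; rw [hle] at hl; exact absurd hl (by decide)
  have hpsp : p ≠ ' ' := by
    intro hpe; rw [hpe] at hp; exact absurd hp (by decide)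
  have hlp : l ≠ p := by
    intro hlp; rw [hlp] at hl
    rw [punct_not_alpha p hp] at hl; exact absurd hl (by decide)
  have hQl : ∀ b, Q l b = false := by
    intro b
    cases hqb : Q l b with
    | false => rfl
    | true =>
      have := (hQ l b hqb).1
      rw [punct_not_alpha l this] at hl; exact absurd hl (by decide)
  induction hn : cs.length using Nat.strong_induction_on generalizing cs with
  | _ n ih =>
    match cs with
    | [] => simp [pvIns, pvRep2]
    | [c] => simp [pvIns, pvSpreadQ, pvRep2]
    | a :: b :: t =>
      simp only [pvIns, pvSpreadQ]
      by_cases hq : Q a b = true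
      · -- already separated here
        simp only [hq, if_true]
        have hblt : PySem.Chars.isalpha b = true := (hQ a b hq).2
        have hbl : b ≠ p := by
          intro hbe; rw [hbe] at hblt
          rw [punct_not_alpha p hp] at hblt; exact absurd hblt (by decide)
        have e1 : pvRep2 p l (a :: ' ' :: b :: pvSpreadQ Q b t) =
            a :: pvRep2 p l (' ' :: b :: pvSpreadQ Q b t) := by
          simp only [pvRep2]
          rw [if_neg (fun hc : a = p ∧ ' ' = l => hlsp hc.2.symm)]
        have e2 : pvRep2 p l (' ' :: b :: pvSpreadQ Q b t) =
            ' ' :: pvRep2 p l (b :: pvSpreadQ Q b t) := by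
          simp only [pvRep2]
          rw [if_neg (fun hc : ' ' = p ∧ b = l => hpsp hc.1.symm)]
        have ihb := ih (b :: t).length (by subst hn; simp) (b :: t) rfl
        simp only [pvIns] at ihb
        simp only [List.cons_append, List.nil_append, e1, e2, ihb, Bool.true_or, if_true]
      · simp only [hq, Bool.false_eq_true, if_false, List.cons_append, List.nil_append]
        by_cases hab : a = p ∧ b = l
        · obtain ⟨rfl, rfl⟩ := hab
          simp only [pvRep2, and_self, if_true]
          match t with
          | [] =>
            simp [pvSpreadQ, pvRep2]
          | h0 :: t' =>
            simp only [pvSpreadQ, hQl, Bool.false_eq_true, if_false, List.cons_append,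
              List.nil_append]
            have iht := ih (h0 :: t').length (by simp at hn ⊢; omega) (h0 :: t') rfl
            simp only [pvIns] at iht
            rw [iht]
            simp only [beq_self_eq_true, Bool.and_self, Bool.or_true, if_true,
              List.cons_append, List.nil_append, List.cons.injEq, true_and]
            simp [beq_eq_false_iff_ne.mpr hlp]
        · simp only [pvRep2]
          rw [if_neg hab]
          have ihb := ih (b :: t).length (by simp at hn ⊢; omega) (b :: t) rfl
          simp only [pvIns] at ihb
          rw [ihb]
          have hcond : (a == p && b == l) = false := by
            rcases not_and_or.mp hab with h1 | h1 <;> simp [beq_eq_false_iff_ne.mpr h1]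
          simp [hcond]

-- pvIns only depends on Q pointwise
lemma spreadQ_congr (Q Q' : Char → Char → Bool) (h : ∀ a b, Q a b = Q' a b) :
    ∀ prev cs, pvSpreadQ Q prev cs = pvSpreadQ Q' prev cs := by
  intro prev cs
  induction cs generalizing prev with
  | nil => rfl
  | cons c t ih => simp [pvSpreadQ, h, ih]

lemma ins_congr (Q Q' : Char → Char → Bool) (h : ∀ a b, Q a b = Q' a b) (cs : List Char) :
    pvIns Q cs = pvIns Q' cs := by
  cases cs with
  | nil => rfl
  | cons c t => simp [pvIns, spreadQ_congr Q Q' h]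

lemma ins_false (cs : List Char) : pvIns (fun _ _ => false) cs = cs := by
  cases cs with
  | nil => rfl
  | cons c t =>
    simp only [pvIns, List.cons.injEq, true_and]
    induction t generalizing c with
    | nil => rfl
    | cons d t' ih => simp [pvSpreadQ, ih]

-- folding replace over a list of admissible pairs separates exactly those pairs
lemma foldB_pairs (cs : List Char) :
    ∀ (L : List (Char × Char)),
    (∀ x ∈ L, pvPunctuation.contains x.1 = true ∧ PySem.Chars.isalpha x.2 = true) →
    ∀ (Q : Char → Char → Bool),
    (∀ a b, Q a b = true → pvPunctuation.contains a = true ∧ PySem.Chars.isalpha b = true) →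
    L.foldl (fun s x => PySem.Chars.replace s [x.1, x.2] [x.1, ' ', x.2]) (pvIns Q cs) =
      pvIns (fun a b => Q a b || L.any (fun x => a == x.1 && b == x.2)) cs := by
  intro L
  induction L with
  | nil =>
    intro _ Q _
    simpa using (ins_congr Q (fun a b => Q a b || false) (by simp) cs).symm
  | cons x L' ih =>
    intro hL Q hQ
    have hx := hL x (by simp)
    have step : PySem.Chars.replace (pvIns Q cs) [x.1, x.2] [x.1, ' ', x.2] =
        pvIns (fun a b => Q a b || (a == x.1 && b == x.2)) cs := by
      rw [replace_rep2]
      exact rep2_ins x.1 x.2 hx.1 hx.2 Q hQ cs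
    have hQ1 : ∀ a b, (Q a b || (a == x.1 && b == x.2)) = true →
        pvPunctuation.contains a = true ∧ PySem.Chars.isalpha b = true := by
      intro a b hab
      rcases Bool.or_eq_true_iff.mp hab with h1 | h1
      · exact hQ a b h1
      · obtain ⟨h2, h3⟩ := Bool.and_eq_true_iff.mp h1
        rw [eq_of_beq h2, eq_of_beq h3]
        exact hx
    rw [List.foldl_cons, step, ih (fun y hy => hL y (by simp [hy])) _ hQ1]
    apply ins_congr
    intro a b
    simp [Bool.or_assoc]

-- nested loops = fold over the flattened pair list
lemma nested_foldl (xs ys : List Char) :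
    ∀ (init : List Char),
    xs.foldl (fun s p => ys.foldl (fun s l => PySem.Chars.replace s [p, l] [p, ' ', l]) s) init =
      (xs.flatMap (fun p => ys.map (fun l => (p, l)))).foldl
        (fun s x => PySem.Chars.replace s [x.1, x.2] [x.1, ' ', x.2]) init := by
  induction xs with
  | nil => intro init; rfl
  | cons p xs' ih =>
    intro init
    simp only [List.foldl_cons, List.flatMap_cons, List.foldl_append, List.foldl_map]
    exact ih _

-- the flattened pair list tests exactly "punctuation and ASCII letter"
lemma anyPL (a b : Char) :
    (pvPunctuation.flatMap (fun p => pvLetters.map (fun l => (p, l)))).any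
        (fun x => a == x.1 && b == x.2) =
      (pvPunctuation.contains a && PySem.Chars.isalpha b) := by
  rw [isalpha_eq_contains, Bool.eq_iff_iff]
  simp only [List.any_eq_true, List.mem_flatMap, List.mem_map, Bool.and_eq_true, beq_iff_eq,
    List.contains_iff_mem]
  constructor
  · rintro ⟨x, ⟨p, hp, l, hl, rfl⟩, rfl, rfl⟩
    exact ⟨hp, hl⟩
  · rintro ⟨hp, hl⟩
    exact ⟨(a, b), ⟨a, hp, b, hl, rfl⟩, rfl, rfl⟩

-- ===== VERDICT (by name: the statement is the Claim_ definition above) =====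
theorem separateFirstLetterFromPunctuation_py_spec : Claim_equal_separateFirstLetterFromPunctuation_py := by
  intro text _
  unfold Spec_separateFirstLetterFromPunctuation_py
  unfold separateFirstLetterFromPunctuation_py separateFirstLetterFromPunctuation_py_alt
  simp only [foldA_spec, List.nil_append]
  rw [nested_foldl pvPunctuation pvLetters]
  conv_rhs => rw [show text.toList = pvIns (fun _ _ => false) text.toList from (ins_false _).symm]
  rw [foldB_pairs text.toList _
      (by
        intro x hx
        simp only [List.mem_flatMap, List.mem_map] at hx
        obtain ⟨p, hp, l, hl, rfl⟩ := hx
        refine ⟨by simpa [List.contains_iff_mem] using hp, ?_⟩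
        rw [isalpha_eq_contains]
        simpa [List.contains_iff_mem] using hl)
      _ (by simp)]
  have hQ : ∀ a b : Char,
      (false || (pvPunctuation.flatMap (fun p => pvLetters.map (fun l => (p, l)))).any
          (fun x => a == x.1 && b == x.2)) = pvQA a b := by
    intro a b
    rw [Bool.false_or, anyPL]
    rfl
  rw [ins_congr _ pvQA hQ]
  -- reduce ins pvQA to A's spread from '1'
  cases h : text.toList with
  | nil => simp [pvSpreadQ, pvIns]
  | cons c rest =>
    have h1 : pvQA '1' c = false := by
      have hc1 : pvPunctuation.contains '1' = false := by decide
      unfold pvQA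
      rw [hc1, Bool.false_and]
    simp [pvIns, pvSpreadQ, h1]
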